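-- pv_equiv track=rewrite | github.com/GauthierMalfilatre/advent_of_code_2025 | caca.py | sort_reseaus
-- ===== SOURCE A (Python) =====
-- def sort_reseaus(reseaus: list[list[tuple[int]]]) -> list[list[tuple[int]]]:
--     """ Sort reseaux """
--     i: int = 0
--     while True:
--         if i + 1 >= len(reseaus) - 1:
--             break
--         if len(reseaus[i]) < len(reseaus[i + 1]):
--             reseaus[i], reseaus[i + 1] = reseaus[i + 1], reseaus[i]
--             i = 0
--         else:
--             i += 1
--     return reseaus
-- ===== SOURCE B (Python) =====
-- def sort_reseaus(reseaus: list[list[tuple[int]]]) -> list[list[tuple[int]]]: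
--     """ Sort reseaux: bucket the first n-1 elements by length, concatenate
--     buckets in descending length order (stable), keep the last element fixed. """
--     buckets = {}
--     for r in reseaus[:-1]:
--         buckets[len(r)] = buckets.get(len(r), []) + [r]
--     out = []
--     for L in sorted(buckets, reverse=True):
--         out += buckets[L]
--     out += reseaus[-1:]
--     reseaus[:] = out
--     return reseaus
-- ===== Notes on version B (the rewrite author's own statement) =====
-- stated objective: alternative
-- what changed: A's restart-to-zero bubble sort of the first n-1 elements (swap adjacent, reset index to 0) is replaced by a single bucketing pass keyed by element length plus one concatenation of the buckets in descending length order; the last element stays fixed, stability within equal lengths is preserved by bucket insertion order, and the list is mutated in place via reseaus[:] = ... like A.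
import Mathlib
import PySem

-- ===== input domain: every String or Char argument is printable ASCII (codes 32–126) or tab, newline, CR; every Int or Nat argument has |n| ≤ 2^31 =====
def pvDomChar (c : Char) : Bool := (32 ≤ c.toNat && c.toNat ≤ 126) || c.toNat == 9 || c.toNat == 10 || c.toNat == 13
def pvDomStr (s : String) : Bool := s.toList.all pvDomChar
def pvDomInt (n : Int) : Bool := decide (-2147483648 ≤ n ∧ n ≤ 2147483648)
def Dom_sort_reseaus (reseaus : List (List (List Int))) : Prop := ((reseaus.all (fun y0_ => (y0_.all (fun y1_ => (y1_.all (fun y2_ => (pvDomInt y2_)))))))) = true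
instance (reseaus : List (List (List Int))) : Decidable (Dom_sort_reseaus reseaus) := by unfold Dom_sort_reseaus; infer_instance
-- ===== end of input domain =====

-- B replaces A's restart-bubble-sort of the first n-1 elements by a one-pass bucketing by
-- length plus a concatenation of the buckets in descending length order (objective: alternative algorithm, same observed cost).
-- Both Pythons mutate the argument list in place and return the same object; the equivalence
-- proved here is about the returned VALUE (the final list contents, identical for both).

-- ===== PORT A =====
-- Number of (not necessarily adjacent) inverted pairs; termination measure for A's while loop.
def pvInv (l : List (List (List Int))) : Nat :=
  match l with
  | [] => 0
  | x :: xs => xs.countP (fun y => x.length < y.length) + pvInv xs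

-- A's swap `reseaus[i], reseaus[i+1] = reseaus[i+1], reseaus[i]` in decomposed form.
theorem pvSwap_decomp (l : List (List (List Int))) (i : Nat) (h : i + 1 < l.length) :
    ∃ p a b s, l = p ++ a :: b :: s ∧ p.length = i := by
  refine ⟨l.take i, l[i]'(by omega), l[i+1]'h, l.drop (i+2), ?_, by simp; omega⟩
  conv_lhs => rw [← List.take_append_drop i l]
  rw [List.drop_eq_getElem_cons (show i < l.length by omega), List.drop_eq_getElem_cons (show i + 1 < l.length from h)]

theorem pvSet_swap (p s : List (List (List Int))) (a b : List (List Int)) :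
    ((p ++ a :: b :: s).set p.length b).set (p.length + 1) a = p ++ b :: a :: s := by
  induction p with
  | nil => simp
  | cons x p ih => simpa using ih

theorem pvGetD_mid (p s : List (List (List Int))) (a : List (List Int)) :
    (p ++ a :: s).getD p.length [] = a := by
  induction p with
  | nil => rfl
  | cons x p ih => simpa using ih

theorem pvCountP_swap (p s : List (List (List Int))) (a b : List (List Int))
    (q : List (List Int) → Bool) :
    (p ++ b :: a :: s).countP q = (p ++ a :: b :: s).countP q := by
  simp [List.countP_append, List.countP_cons]; omega

theorem pvInv_swap (p s : List (List (List Int))) (a b : List (List Int))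
    (hab : a.length < b.length) :
    pvInv (p ++ b :: a :: s) + 1 = pvInv (p ++ a :: b :: s) := by
  induction p with
  | nil =>
    simp only [List.nil_append, pvInv, List.countP_cons]
    have : ¬ (b.length < a.length) := by omega
    simp [hab, this]; omega
  | cons x p ih =>
    simp only [List.cons_append, pvInv]
    rw [pvCountP_swap]
    omega

-- Literal port of A's `while True` loop over state (reseaus, i); the loop only reads/writes
-- indices < len-1, guarded by the break condition, so getD/set with default [] is exact.
def pvALoop (l : List (List (List Int))) (i : Nat) : List (List (List Int)) :=
  if h : l.length - 1 ≤ i + 1 then l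
  else if h2 : (l.getD i []).length < (l.getD (i+1) []).length then
    pvALoop ((l.set i (l.getD (i+1) [])).set (i+1) (l.getD i [])) 0
  else
    pvALoop l (i+1)
termination_by (pvInv l, l.length - i)
decreasing_by
  · obtain ⟨p, a, b, s, rfl, hp⟩ := pvSwap_decomp l i (by omega)
    have hga : (p ++ a :: b :: s).getD i [] = a := by rw [← hp]; exact pvGetD_mid p (b :: s) a
    have hgb : (p ++ a :: b :: s).getD (i+1) [] = b := by
      have := pvGetD_mid (p ++ [a]) s b; simpa [hp] using this
    rw [hga, hgb] at h2 ⊢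
    have hset : ((p ++ a :: b :: s).set i b).set (i+1) a = p ++ b :: a :: s := by
      rw [← hp]; exact pvSet_swap p s a b
    rw [hset]
    exact Prod.Lex.left _ _ (by have := pvInv_swap p s a b h2; omega)
  · exact Prod.Lex.right _ (by omega)

def sort_reseaus (reseaus : List (List (List Int))) : List (List (List Int)) :=
  pvALoop reseaus 0

-- ===== PORT B =====
-- Source B: bucket reseaus[:-1] by len into a dict (insertion order inside each bucket),
-- concatenate buckets for the distinct lengths in descending order, append reseaus[-1:].
def sort_reseaus_alt (reseaus : List (List (List Int))) : List (List (List Int)) :=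
  let buckets : PySem.Dict Int (List (List (List Int))) :=
    (PySem.List.slice reseaus none (some (-1))).foldl
      (fun d r => d.modify ((r.length : Int)) [] (fun v => v ++ [r])) PySem.Dict.empty
  let out : List (List (List Int)) :=
    (PySem.List.sorted buckets.keys (fun x => x) true).foldl
      (fun acc L => acc ++ buckets.getD L []) []   -- buckets[L]: L is always a key, getD exact
  out ++ PySem.List.slice reseaus (some (-1)) none

-- ===== PRECONDITION & SPEC =====
def Spec_sort_reseaus (reseaus : List (List (List Int))) (out : List (List (List Int))) : Prop := out = sort_reseaus_alt reseaus
instance (reseaus : List (List (List Int))) (out : List (List (List Int))) : Decidable (Spec_sort_reseaus reseaus out) := by unfold Spec_sort_reseaus; infer_instance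

-- ===== CLAIM (what is proved, stated in full; the proofs are below) =====
def Claim_equal_sort_reseaus : Prop := ∀ (reseaus : List (List (List Int))), Dom_sort_reseaus reseaus → Spec_sort_reseaus reseaus (sort_reseaus reseaus)

-- ===== LEMMAS AND PROOFS =====

-- the filter of a list by one length class
def pvKF (L : Int) (l : List (List (List Int))) : List (List (List Int)) :=
  l.filter (fun r => decide ((r.length : Int) = L))

theorem pvKF_swap (L : Int) (p s : List (List (List Int))) (a b : List (List Int))
    (hab : a.length ≠ b.length) :
    pvKF L (p ++ b :: a :: s) = pvKF L (p ++ a :: b :: s) := by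
  unfold pvKF
  simp only [List.filter_append, List.filter_cons]
  have : ¬((a.length : Int) = L ∧ (b.length : Int) = L) := by
    rintro ⟨h1, h2⟩; exact hab (by omega)
  by_cases ha : (a.length : Int) = L <;> by_cases hb : (b.length : Int) = L <;>
    simp [ha, hb] at this ⊢

theorem pvDrop_swap (p s : List (List (List Int))) (a b : List (List Int)) (k : Nat)
    (hk : p.length + 2 ≤ k) :
    (p ++ b :: a :: s).drop k = (p ++ a :: b :: s).drop k := by
  have h1 : p ++ b :: a :: s = (p ++ [b, a]) ++ s := by simp
  have h2 : p ++ a :: b :: s = (p ++ [a, b]) ++ s := by simp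
  have e1 : List.drop k (p ++ [b, a] ++ s) = List.drop (k - (p.length + 2)) s := by
    rw [List.drop_append, List.drop_eq_nil_of_le (by simp; omega)]; simp
  have e2 : List.drop k (p ++ [a, b] ++ s) = List.drop (k - (p.length + 2)) s := by
    rw [List.drop_append, List.drop_eq_nil_of_le (by simp; omega)]; simp
  rw [h1, h2, e1, e2]

-- master invariant for A's loop: length-class filters, length, and the untouched tail are
-- preserved; on exit the first n-1 entries are non-increasing in length.
theorem pvALoop_main (l : List (List (List Int))) (i : Nat) :
    (∀ L, pvKF L (pvALoop l i) = pvKF L l)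
    ∧ (pvALoop l i).length = l.length
    ∧ (pvALoop l i).drop (l.length - 1) = l.drop (l.length - 1)
    ∧ ((∀ j, j + 1 ≤ i → ((l.getD (j+1) []).length ≤ (l.getD j []).length)) →
        ∀ j, j + 2 < l.length →
          (((pvALoop l i).getD (j+1) []).length ≤ ((pvALoop l i).getD j []).length)) := by
  induction l, i using pvALoop.induct with
  | case1 l i h =>
    rw [pvALoop, dif_pos h]
    refine ⟨fun L => rfl, rfl, rfl, ?_⟩
    intro hpre j hj
    exact hpre j (by omega)
  | case2 l i h h2 ih =>
    obtain ⟨p, a, b, s, rfl, hp⟩ := pvSwap_decomp l i (by omega)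
    have hga : (p ++ a :: b :: s).getD i [] = a := by rw [← hp]; exact pvGetD_mid p (b :: s) a
    have hgb : (p ++ a :: b :: s).getD (i+1) [] = b := by
      have := pvGetD_mid (p ++ [a]) s b; simpa [hp] using this
    have hab : a.length < b.length := by rw [hga, hgb] at h2; exact h2
    have hset : (((p ++ a :: b :: s).set i ((p ++ a :: b :: s).getD (i+1) [])).set (i+1)
        ((p ++ a :: b :: s).getD i [])) = p ++ b :: a :: s := by
      rw [hga, hgb, ← hp]; exact pvSet_swap p s a b
    have heq : pvALoop (p ++ a :: b :: s) i = pvALoop (p ++ b :: a :: s) 0 := by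
      conv_lhs => rw [pvALoop]
      rw [dif_neg h, dif_pos h2, hset]
    rw [hset] at ih
    have hlen : (p ++ b :: a :: s).length = (p ++ a :: b :: s).length := by simp
    have hslen : 1 ≤ s.length := by simp at h; omega
    refine ⟨?_, ?_, ?_, ?_⟩
    · intro L
      rw [heq, ih.1 L, pvKF_swap L p s a b (by omega)]
    · rw [heq, ih.2.1, hlen]
    · rw [heq]
      have := ih.2.2.1
      rw [hlen] at this
      rw [this, pvDrop_swap p s a b _ (by simp; omega)]
    · intro _ j hj
      rw [heq]
      exact ih.2.2.2 (by intro j hj1; omega) j (by omega)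
  | case3 l i h h2 ih =>
    have heq : pvALoop l i = pvALoop l (i+1) := by
      conv_lhs => rw [pvALoop]
      rw [dif_neg h, dif_neg h2]
    refine ⟨fun L => heq ▸ ih.1 L, heq ▸ ih.2.1, heq ▸ ih.2.2.1, ?_⟩
    intro hpre j hj
    have hpre' : ∀ j, j + 1 ≤ i + 1 → ((l.getD (j+1) []).length ≤ (l.getD j []).length) := by
      intro j hj1
      rcases Nat.lt_or_ge j i with hji | hji
      · exact hpre j (by omega)
      · have : j = i := by omega
        subst this
        exact Nat.le_of_not_lt h2
    exact heq ▸ ih.2.2.2 hpre' j hj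

-- uniqueness: a non-increasing list is determined by its length-class filters
theorem pvUniq (l1 l2 : List (List (List Int)))
    (h1 : l1.Pairwise (fun a b => b.length ≤ a.length))
    (h2 : l2.Pairwise (fun a b => b.length ≤ a.length))
    (hf : ∀ L, pvKF L l1 = pvKF L l2) : l1 = l2 := by
  induction l1 generalizing l2 with
  | nil =>
    cases l2 with
    | nil => rfl
    | cons b t2 => have := hf (b.length); unfold pvKF at this; simp at this
  | cons a t1 ih =>
    cases l2 with
    | nil => have := hf (a.length); unfold pvKF at this; simp at this
    | cons b t2 =>
      by_cases hab : a.length = b.length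
      · have hfa := hf ((a.length : Int))
        unfold pvKF at hfa
        rw [List.filter_cons, List.filter_cons, if_pos (by simp), if_pos (by simp [hab])] at hfa
        simp only [List.cons.injEq] at hfa
        obtain ⟨rfl, -⟩ := hfa
        have htails : ∀ L, pvKF L t1 = pvKF L t2 := by
          intro L
          by_cases hL : ((a.length : Int) = L)
          · have h := hf L
            unfold pvKF at h ⊢
            rw [List.filter_cons, List.filter_cons, if_pos (by simpa using hL),
              if_pos (by simpa using hL)] at h
            simpa using h
          · have h := hf L
            unfold pvKF at h ⊢
            rwa [List.filter_cons, List.filter_cons, if_neg (by simpa using hL),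
              if_neg (by simpa using hL)] at h
        rw [ih t2 (List.pairwise_cons.mp h1).2 (List.pairwise_cons.mp h2).2 htails]
      · exfalso
        have hfa := hf (a.length)
        unfold pvKF at hfa
        rw [List.filter_cons, List.filter_cons] at hfa
        rw [if_pos (by simp), if_neg (by simp; omega)] at hfa
        have ha2 : a ∈ t2 := by
          have : a ∈ List.filter (fun r => decide ((r.length : Int) = (a.length : Int))) t2 := by
            rw [← hfa]; exact List.mem_cons_self
          exact (List.mem_filter.mp this).1
        have hfb := hf (b.length)
        unfold pvKF at hfb
        rw [List.filter_cons, List.filter_cons] at hfb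
        rw [if_neg (by simp; omega), if_pos (by simp)] at hfb
        have hb1 : b ∈ t1 := by
          have : b ∈ List.filter (fun r => decide ((r.length : Int) = (b.length : Int))) t1 := by
            rw [hfb]; exact List.mem_cons_self
          exact (List.mem_filter.mp this).1
        have p1 := List.rel_of_pairwise_cons h1 hb1
        have p2 := List.rel_of_pairwise_cons h2 ha2
        omega

-- B-side: the bucket of L is exactly the length-class filter of the scanned prefix
theorem pvBucket (hs : List (List (List Int))) (d : PySem.Dict Int (List (List (List Int))))
    (L : Int) :
    (hs.foldl (fun d r => d.modify ((r.length : Int)) [] (fun v => v ++ [r])) d).getD L []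
      = d.getD L [] ++ pvKF L hs := by
  induction hs generalizing d with
  | nil => simp [pvKF]
  | cons r hs ih =>
    rw [List.foldl_cons, ih]
    rw [PySem.Dict.getD_modify]
    unfold pvKF
    by_cases hL : (r.length : Int) = L
    · simp [hL, List.filter_cons]
    · have : ¬ (L = (r.length : Int)) := fun h => hL h.symm
      simp [hL, this, List.filter_cons]

theorem pvKF_len {L : Int} {head : List (List (List Int))} {r : List (List Int)}
    (h : r ∈ pvKF L head) : (r.length : Int) = L := by
  unfold pvKF at h
  simpa using (List.mem_filter.mp h).2

theorem pvOut_pairwise (head : List (List (List Int))) (ks : List Int)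
    (hks : ks.Pairwise (fun a b => b < a)) :
    (ks.flatMap (fun L => pvKF L head)).Pairwise (fun a b => b.length ≤ a.length) := by
  induction ks with
  | nil => simp
  | cons L ks ih =>
    rw [List.flatMap_cons, List.pairwise_append]
    refine ⟨List.pairwise_of_forall_mem_list ?_, ih (List.pairwise_cons.mp hks).2, ?_⟩
    · intro x hx y hy
      have := pvKF_len hx; have := pvKF_len hy; omega
    · intro x hx y hy
      obtain ⟨L', hL', hy'⟩ := List.mem_flatMap.mp hy
      have h1 := pvKF_len hx
      have h2 := pvKF_len hy'
      have h3 : L' < L := List.rel_of_pairwise_cons hks hL'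
      omega

theorem pvKF_KF (L L' : Int) (head : List (List (List Int))) :
    pvKF L' (pvKF L head) = if L = L' then pvKF L' head else [] := by
  by_cases h : L = L'
  · subst h
    rw [if_pos rfl]
    unfold pvKF
    rw [List.filter_filter]
    apply List.filter_congr
    intro r _
    by_cases hr : (r.length : Int) = L <;> simp [hr]
  · rw [if_neg h]
    apply List.filter_eq_nil_iff.mpr
    intro r hr
    have := pvKF_len hr
    simp; omega

theorem pvFlat_filter_notmem (head : List (List (List Int))) (L' : Int) (ks : List Int)
    (h : L' ∉ ks) : pvKF L' (ks.flatMap (fun L => pvKF L head)) = [] := by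
  induction ks with
  | nil => simp [pvKF]
  | cons L ks ih =>
    rw [List.flatMap_cons]
    unfold pvKF
    rw [List.filter_append]
    have e1 : pvKF L' (pvKF L head) = [] := by
      rw [pvKF_KF, if_neg (by intro hh; exact h (hh ▸ List.mem_cons_self))]
    unfold pvKF at e1 ih
    rw [e1, ih (fun hm => h (List.mem_cons_of_mem _ hm))]
    simp

theorem pvOut_filter (head : List (List (List Int))) (ks : List Int)
    (hnd : ks.Nodup) (hmem : ∀ L : Int, L ∈ ks ↔ ∃ r ∈ head, (r.length : Int) = L) :
    ∀ L', pvKF L' (ks.flatMap (fun L => pvKF L head)) = pvKF L' head := by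
  have hmemkf : ∀ (ks' : List Int), ks'.Nodup → ∀ L', L' ∈ ks' →
      pvKF L' (ks'.flatMap (fun L => pvKF L head)) = pvKF L' head := by
    intro ks'
    induction ks' with
    | nil => intro _ L' h; simp at h
    | cons L ks' ih =>
      intro hnd L' hL'
      rw [List.flatMap_cons]
      unfold pvKF
      rw [List.filter_append]
      rcases List.mem_cons.mp hL' with rfl | hmem
      · have e1 := pvKF_KF L' L' head
        rw [if_pos rfl] at e1
        have e2 := pvFlat_filter_notmem head L' ks' (List.nodup_cons.mp hnd).1
        unfold pvKF at e1 e2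
        rw [e1, e2, List.append_nil]
      · have hne : L ≠ L' := by
          rintro rfl; exact (List.nodup_cons.mp hnd).1 hmem
        have e1 := pvKF_KF L L' head
        rw [if_neg hne] at e1
        have e2 := ih (List.nodup_cons.mp hnd).2 L' hmem
        unfold pvKF at e1 e2
        rw [e1, e2, List.nil_append]
  intro L'
  by_cases hL' : L' ∈ ks
  · exact hmemkf ks hnd L' hL'
  · rw [pvFlat_filter_notmem head L' ks hL']
    symm
    apply List.filter_eq_nil_iff.mpr
    intro r hr
    simp only [decide_eq_true_eq]
    intro hlen
    exact hL' ((hmem L').mpr ⟨r, hr, hlen⟩)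

theorem pvAdj_pairwise (m : List (List (List Int)))
    (hadj : ∀ j, j + 1 < m.length → ((m.getD (j+1) []).length ≤ (m.getD j []).length)) :
    m.Pairwise (fun a b => b.length ≤ a.length) := by
  have mono : ∀ u v : Nat, u ≤ v → v < m.length →
      ((m.getD v []).length ≤ (m.getD u []).length) := by
    intro u v huv
    induction v, huv using Nat.le_induction with
    | base => intro _; exact le_rfl
    | succ v hv' ih => intro hv; exact le_trans (hadj v hv) (ih (by omega))
  rw [List.pairwise_iff_getElem]
  intro u v hu hv huv
  have := mono u v (by omega) hv
  rwa [List.getD_eq_getElem _ _ hu, List.getD_eq_getElem _ _ hv] at this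

theorem pvB_eq (l : List (List (List Int))) :
    sort_reseaus_alt l =
      ((PySem.List.sorted
          ((l.dropLast.foldl
            (fun d r => d.modify ((r.length : Int)) [] (fun v => v ++ [r]))
            PySem.Dict.empty).keys)
          (fun x => x) true).flatMap (fun L => pvKF L l.dropLast)) ++ l.drop (l.length - 1) := by
  dsimp only [sort_reseaus_alt]
  rw [PySem.List.slice_to_neg_one, PySem.List.slice_from_neg_one,
    PySem.List.foldl_append_eq_flatMap, List.nil_append]
  congr 1
  have hfg : (fun L : Int => (List.foldl
        (fun d r => d.modify ((r.length : Int)) [] (fun v => v ++ [r]))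
        PySem.Dict.empty l.dropLast).getD L []) = fun L => pvKF L l.dropLast := by
    funext L
    rw [pvBucket]
    simp [PySem.Dict.getD_empty]
  rw [hfg]

-- ===== VERDICT (by name: the statement is the Claim_ definition above) =====
theorem sort_reseaus_spec : Claim_equal_sort_reseaus := by
  unfold Claim_equal_sort_reseaus Spec_sort_reseaus
  intro l _
  obtain ⟨F, LEN, DR, S⟩ := pvALoop_main l 0
  have S' := S (by intro j hj; omega)
  set n := l.length with hn
  set rA := pvALoop l 0 with hrA
  set head := l.dropLast with hhead
  have hheadtake : head = l.take (n - 1) := List.dropLast_eq_take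
  set buckets := (head.foldl
      (fun d r => d.modify ((r.length : Int)) [] (fun v => v ++ [r]))
      PySem.Dict.empty) with hbuckets
  set ks := PySem.List.sorted buckets.keys (fun x => x) true with hks
  -- key facts about ks
  have hkeysnd : buckets.keys.Nodup := by
    apply PySem.Dict.nodup_keys_foldl_modify_key
    simp [PySem.Dict.keys_empty]
  have hkeysmem : ∀ L : Int, L ∈ buckets.keys ↔ L ∈ head.map (fun r => (r.length : Int)) := by
    intro L
    rw [hbuckets, PySem.Dict.keys_foldl_modify_key, PySem.Set.mem_update]
    simp [PySem.Dict.keys_empty]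
  have hksnd : ks.Nodup := ((PySem.List.sorted_perm buckets.keys (fun x => x) true).nodup_iff).mpr hkeysnd
  have hksmem : ∀ L : Int, L ∈ ks ↔ ∃ r ∈ head, (r.length : Int) = L := by
    intro L
    rw [hks, PySem.List.mem_sorted, hkeysmem]
    simp [List.mem_map]
  have hkspw : ks.Pairwise (fun a b : Int => b < a) := by
    have h1 : ks.Pairwise (fun a b : Int => b ≤ a) := PySem.List.sorted_pairwise_rev buckets.keys (fun x => x)
    have h2 : ks.Pairwise (fun a b : Int => a ≠ b) := hksnd
    exact (h1.and h2).imp (fun ⟨hle, hne⟩ => lt_of_le_of_ne hle hne.symm)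
  set out := ks.flatMap (fun L => pvKF L head) with hout
  -- pairwise on both sides
  have hpwB : out.Pairwise (fun a b => b.length ≤ a.length) := pvOut_pairwise head ks hkspw
  have hpwA : (rA.take (n - 1)).Pairwise (fun a b => b.length ≤ a.length) := by
    apply pvAdj_pairwise
    intro j hj
    have hlt : (rA.take (n - 1)).length = n - 1 := by
      rw [List.length_take, LEN]; omega
    rw [hlt] at hj
    have e1 : (rA.take (n - 1)).getD j [] = rA.getD j [] := by
      rw [List.getD_eq_getElem _ _ (by rw [hlt]; omega),
        List.getD_eq_getElem _ _ (by rw [LEN]; omega)]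
      exact List.getElem_take
    have e2 : (rA.take (n - 1)).getD (j + 1) [] = rA.getD (j + 1) [] := by
      rw [List.getD_eq_getElem _ _ (by rw [hlt]; omega),
        List.getD_eq_getElem _ _ (by rw [LEN]; omega)]
      exact List.getElem_take
    rw [e1, e2]
    exact S' j (by omega)
  -- filter equality between the two heads
  have hfilters : ∀ L, pvKF L (rA.take (n - 1)) = pvKF L out := by
    intro L
    have hB : pvKF L out = pvKF L head := pvOut_filter head ks hksnd hksmem L
    have hA : pvKF L rA = pvKF L (rA.take (n - 1)) ++ pvKF L (rA.drop (n - 1)) := by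
      unfold pvKF
      rw [← List.filter_append, List.take_append_drop]
    have hl : pvKF L l = pvKF L head ++ pvKF L (l.drop (n - 1)) := by
      unfold pvKF
      rw [hheadtake, ← List.filter_append, List.take_append_drop]
    have hdr : pvKF L (rA.drop (n - 1)) = pvKF L (l.drop (n - 1)) := by
      rw [DR]
    rw [hB]
    apply List.append_cancel_right (bs := pvKF L (l.drop (n - 1)))
    rw [← hdr, ← hA, F L, hl, hdr]
  -- uniqueness
  have hmain : rA.take (n - 1) = out := pvUniq _ _ hpwA hpwB (fun L => hfilters L)
  -- assemble
  have : sort_reseaus l = rA.take (n - 1) ++ rA.drop (n - 1) := by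
    unfold sort_reseaus
    rw [← hrA, List.take_append_drop]
  rw [this, hmain, DR, pvB_eq]
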